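-- pv_equiv track=rewrite | github.com/tharunm6/metar-reader | metar_parser.py | _decode_phenomena
-- ===== SOURCE A (Python) =====
-- _WX_PHENOMENA = {
--     "DZ": "drizzle", "RA": "rain", "SN": "snow", "SG": "snow grains",
--     "IC": "ice crystals", "PL": "ice pellets", "GR": "hail",
--     "GS": "small hail", "UP": "unknown precipitation",
--     "BR": "mist", "FG": "fog", "FU": "smoke", "VA": "volcanic ash",
--     "DU": "dust", "SA": "sand", "HZ": "haze", "PY": "spray",
--     "PO": "dust/sand whirls", "SQ": "squalls",
--     "FC": "funnel cloud / tornado", "SS": "sandstorm", "DS": "dust storm",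
-- }
--
-- def _decode_phenomena(token: str) -> list:
--     """Break a phenomena string into a list of readable labels."""
--     result = []
--     while token:
--         matched = False
--         for code, label in _WX_PHENOMENA.items():
--             if token.startswith(code):
--                 result.append(label)
--                 token = token[len(code):]
--                 matched = True
--                 break
--         if not matched:
--             result.append(token)
--             break
--     return result
-- ===== SOURCE B (Python) =====
-- _WX_PHENOMENA = {
--     "DZ": "drizzle", "RA": "rain", "SN": "snow", "SG": "snow grains",
--     "IC": "ice crystals", "PL": "ice pellets", "GR": "hail",
--     "GS": "small hail", "UP": "unknown precipitation",
--     "BR": "mist", "FG": "fog", "FU": "smoke", "VA": "volcanic ash",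
--     "DU": "dust", "SA": "sand", "HZ": "haze", "PY": "spray",
--     "PO": "dust/sand whirls", "SQ": "squalls",
--     "FC": "funnel cloud / tornado", "SS": "sandstorm", "DS": "dust storm",
-- }
--
-- def _decode_phenomena(token: str) -> list:
--     """Break a phenomena string into a list of readable labels."""
--     if not token:
--         return []
--     label = _WX_PHENOMENA.get(token[:2])
--     if label is None:
--         return [token]
--     return [label] + _decode_phenomena(token[2:])
-- ===== Notes on version B (the rewrite author's own statement) =====
-- stated objective: idiomatic
-- what changed: Replaces the while-loop that linearly scans all 22 dict codes with startswith at every step by a structural recursion that hashes the fixed 2-char prefix once per step via dict.get.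
import Mathlib
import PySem

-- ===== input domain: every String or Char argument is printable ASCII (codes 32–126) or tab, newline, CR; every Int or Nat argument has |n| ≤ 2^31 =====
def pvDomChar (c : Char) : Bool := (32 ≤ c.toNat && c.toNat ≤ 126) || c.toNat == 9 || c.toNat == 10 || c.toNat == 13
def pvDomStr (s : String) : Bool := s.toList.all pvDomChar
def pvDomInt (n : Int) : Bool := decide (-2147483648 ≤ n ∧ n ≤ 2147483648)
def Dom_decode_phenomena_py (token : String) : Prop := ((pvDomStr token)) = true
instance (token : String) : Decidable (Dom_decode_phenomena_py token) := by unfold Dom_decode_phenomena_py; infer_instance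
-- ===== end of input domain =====

-- B replaces A's per-step linear scan of the 22 codes (startswith each) by a recursion that
-- looks up the fixed 2-char prefix directly in the dict; same return value on every input.

-- ===== PORT A =====
-- the module-level dict _WX_PHENOMENA, in insertion order
def wxList : List (String × String) :=
  [("DZ", "drizzle"), ("RA", "rain"), ("SN", "snow"), ("SG", "snow grains"),
   ("IC", "ice crystals"), ("PL", "ice pellets"), ("GR", "hail"),
   ("GS", "small hail"), ("UP", "unknown precipitation"),
   ("BR", "mist"), ("FG", "fog"), ("FU", "smoke"), ("VA", "volcanic ash"),
   ("DU", "dust"), ("SA", "sand"), ("HZ", "haze"), ("PY", "spray"),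
   ("PO", "dust/sand whirls"), ("SQ", "squalls"),
   ("FC", "funnel cloud / tornado"), ("SS", "sandstorm"), ("DS", "dust storm")]

-- the inner 'for code, label in _WX_PHENOMENA.items(): if token.startswith(code): … break':
-- first item whose code is a prefix of the remaining token
def wxFind (toks : List Char) : List (String × String) → Option (String × String)
  | [] => none
  | (c, l) :: rest => if c.toList.isPrefixOf toks then some (c, l) else wxFind toks rest

theorem wxFind_mem {toks : List Char} {l : List (String × String)} {p : String × String}
    (h : wxFind toks l = some p) : p ∈ l := by
  induction l with
  | nil => simp [wxFind] at h
  | cons q rest ih =>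
    obtain ⟨c, lab⟩ := q
    simp only [wxFind] at h
    split at h
    · simp_all
    · exact List.mem_cons_of_mem _ (ih h)

theorem wxFind_code_len {toks : List Char} {p : String × String}
    (h : wxFind toks wxList = some p) : p.1.toList.length = 2 := by
  have hm := wxFind_mem h
  fin_cases hm <;> decide

-- the while loop: 'result' accumulator; matched branch drops len(code) chars, unmatched appends the rest and breaks
def aLoop (toks : List Char) (result : List String) : List String :=
  if h0 : toks = [] then result
  else
    match h : wxFind toks wxList with
    | some (c, l) => aLoop (toks.drop c.toList.length) (result ++ [l])
    | none => result ++ [String.ofList toks]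
termination_by toks.length
decreasing_by
  have h2 : c.toList.length = 2 := wxFind_code_len h
  rw [List.length_drop, h2]
  cases toks with
  | nil => exact absurd rfl h0
  | cons a t => simp

def decode_phenomena_py (token : String) : List String := aLoop token.toList []

-- ===== PORT B =====
def wxDict : PySem.Dict String String := PySem.Dict.mk wxList

-- B: if not token: []; label = dict.get(token[:2]); None → [token]; else [label] + recurse on token[2:]
def altGo (toks : List Char) : List String :=
  if h0 : toks = [] then []
  else
    match wxDict.get? (String.ofList (toks.take 2)) with
    | none => [String.ofList toks]
    | some label => label :: altGo (toks.drop 2)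
termination_by toks.length
decreasing_by
  cases toks with
  | nil => exact absurd rfl h0
  | cons a t => simp

def decode_phenomena_py_alt (token : String) : List String := altGo token.toList

-- ===== PRECONDITION & SPEC =====
def Spec_decode_phenomena_py (token : String) (out : List String) : Prop := out = decode_phenomena_py_alt token
instance (token : String) (out : List String) : Decidable (Spec_decode_phenomena_py token out) := by unfold Spec_decode_phenomena_py; infer_instance

-- ===== CLAIM (what is proved, stated in full; the proofs are below) =====
def Claim_equal_decode_phenomena_py : Prop := ∀ (token : String), Dom_decode_phenomena_py token → Spec_decode_phenomena_py token (decode_phenomena_py token)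

-- ===== LEMMAS AND PROOFS =====

-- a 2-char code is a prefix of toks iff it equals toks.take 2
theorem prefix_iff_take2 {c toks : List Char} (hc : c.length = 2) :
    c.isPrefixOf toks = true ↔ toks.take 2 = c := by
  rw [List.isPrefixOf_iff_prefix, List.prefix_iff_eq_take, hc]
  exact eq_comm

-- the first startswith-match in A's items scan is exactly B's dict lookup of the 2-char prefix
theorem wxFind_eq_get?_gen (toks : List Char) (l : List (String × String))
    (hall : ∀ p ∈ l, (p.1 : String).toList.length = 2) :
    wxFind toks l
      = ((PySem.Dict.mk l).get? (String.ofList (toks.take 2))).map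
          (fun lab => (String.ofList (toks.take 2), lab)) := by
  induction l with
  | nil => simp [wxFind, PySem.Dict.get?]
  | cons q rest ih =>
    obtain ⟨c, lab⟩ := q
    have hc : c.toList.length = 2 := hall (c, lab) (by simp)
    rw [wxFind, PySem.Dict.get?_mk_cons]
    by_cases hmatch : c.toList = toks.take 2
    · have hpre : c.toList.isPrefixOf toks = true := (prefix_iff_take2 hc).2 hmatch.symm
      have hceq : c = String.ofList (toks.take 2) := by
        rw [← hmatch, String.ofList_toList]
      rw [if_pos hpre, if_pos (by rw [beq_iff_eq]; exact hceq), Option.map_some]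
      rw [hceq]
    · have hpre : ¬ c.toList.isPrefixOf toks = true := by
        intro h; exact hmatch ((prefix_iff_take2 hc).1 h).symm
      have hbeq : ¬ (c == String.ofList (toks.take 2)) = true := by
        rw [beq_iff_eq]
        intro h
        apply hmatch
        rw [h, String.toList_ofList]
      rw [if_neg hpre, if_neg hbeq]
      exact ih (fun p hp => hall p (List.mem_cons_of_mem _ hp))

theorem wxFind_eq_get? (toks : List Char) :
    wxFind toks wxList
      = (wxDict.get? (String.ofList (toks.take 2))).map
          (fun lab => (String.ofList (toks.take 2), lab)) :=
  wxFind_eq_get?_gen toks wxList (by decide)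

theorem aLoop_eq (toks : List Char) (result : List String) :
    aLoop toks result = result ++ altGo toks := by
  by_cases h0 : toks = []
  · rw [aLoop, altGo, dif_pos h0, dif_pos h0, List.append_nil]
  · rw [aLoop, altGo, dif_neg h0, dif_neg h0]
    rcases hg : wxDict.get? (String.ofList (toks.take 2)) with _ | label
    · have hf : wxFind toks wxList = none := by rw [wxFind_eq_get?, hg]; rfl
      split
      · next c lab heq => rw [hf] at heq; cases heq
      · next heq => rfl
    · have hf : wxFind toks wxList = some (String.ofList (toks.take 2), label) := by
        rw [wxFind_eq_get?, hg]; rfl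
      have hlen : (String.ofList (toks.take 2)).toList.length = 2 := wxFind_code_len hf
      split
      · next c lab heq =>
        rw [hf] at heq
        obtain ⟨rfl, rfl⟩ : String.ofList (toks.take 2) = c ∧ label = lab := by
          cases heq; exact ⟨rfl, rfl⟩
        rw [hlen, aLoop_eq (toks.drop 2) (result ++ [label])]
        simp
      · next heq => rw [hf] at heq; cases heq
termination_by toks.length
decreasing_by
  cases toks with
  | nil => exact absurd rfl h0
  | cons a t => simp

-- ===== VERDICT (by name: the statement is the Claim_ definition above) =====
theorem decode_phenomena_py_spec : Claim_equal_decode_phenomena_py := by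
  intro token _
  show decode_phenomena_py token = decode_phenomena_py_alt token
  unfold decode_phenomena_py decode_phenomena_py_alt
  simpa using aLoop_eq token.toList []
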